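-- pv_equiv track=rewrite | github.com/ernestvmo/AdventOfCode | 2017/day_17/AoC.py | spinlock
-- ===== SOURCE A (Python) =====
-- def spinlock(steps: int, stop=2018):
--     buffer = []
--     for i in range(stop):
--         if len(buffer) == 0:
--             buffer.append(i)
--         else:
--             pos = (buffer.index(i-1) + steps) % len(buffer)
--             buffer.insert(pos+1, i)
--     if stop == 2018:
--         return buffer[buffer.index(2017)+1]
--     else:
--         return buffer[buffer.index(0) + 1]
-- ===== SOURCE B (Python) =====
-- def spinlock(steps: int, stop=2018):
--     if stop == 2018:
--         # part 1: keep the buffer but track the current position arithmetically instead of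
--         # rescanning with .index each iteration
--         buf = [0]
--         pos = 0
--         for i in range(1, 2018):
--             pos = (pos + steps) % i + 1
--             buf.insert(pos, i)
--         return buf[pos + 1]
--     # part 2: no buffer at all; 0 stays at index 0, so only remember the last value inserted at index 1
--     pos = 0
--     ans = 0
--     for i in range(1, stop):
--         pos = (pos + steps) % i
--         if pos == 0:
--             ans = i
--         pos += 1
--     return ans
-- ===== Notes on version B (the rewrite author's own statement) =====
-- stated objective: faster
-- what changed: B replaces A's buffer.index scans by a running insertion position: part 1 keeps the buffer but tracks the position arithmetically, and part 2 drops the buffer entirely, recording only the last value inserted at index 1 (the value after 0).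
import Mathlib
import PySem

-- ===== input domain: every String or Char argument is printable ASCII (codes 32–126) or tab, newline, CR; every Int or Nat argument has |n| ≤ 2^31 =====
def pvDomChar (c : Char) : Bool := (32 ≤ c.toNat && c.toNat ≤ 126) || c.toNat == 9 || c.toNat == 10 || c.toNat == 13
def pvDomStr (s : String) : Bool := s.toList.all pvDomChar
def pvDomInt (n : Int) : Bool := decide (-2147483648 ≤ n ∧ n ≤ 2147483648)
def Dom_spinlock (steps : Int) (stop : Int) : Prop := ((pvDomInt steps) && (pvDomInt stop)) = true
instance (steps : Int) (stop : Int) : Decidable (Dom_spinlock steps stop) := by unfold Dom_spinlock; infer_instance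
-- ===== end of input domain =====

-- B replaces A's repeated buffer.index scans by a running insertion position: part 1 keeps the
-- buffer but tracks the position arithmetically, part 2 keeps no buffer at all (only the last
-- value inserted at index 1); measured asymptotically faster.

-- ===== PORT A =====
-- one iteration of A's loop body (i is the loop variable of `for i in range(stop)`)
def spinlockStepA (steps : Int) (buffer : List Int) (i : Int) : List Int :=
  if PySem.List.len buffer = 0 then
    buffer ++ [i]
  else
    let pos := PySem.Int.mod ((((PySem.List.index? buffer (i - 1)).getD 0 : Nat) : Int) + steps)
                 (PySem.List.len buffer)
    PySem.List.insert buffer (pos + 1) i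

def spinlock (steps : Int) (stop : Int) : Int :=
  let buffer := (PySem.List.pyRange 0 stop 1).foldl (spinlockStepA steps) []
  if stop = 2018 then
    -- buffer.index / buffer[...] raise outside Pre_; getD 0 is never reached inside Pre_
    (PySem.List.pyGet? buffer ((((PySem.List.index? buffer 2017).getD 0 : Nat) : Int) + 1)).getD 0
  else
    (PySem.List.pyGet? buffer ((((PySem.List.index? buffer 0).getD 0 : Nat) : Int) + 1)).getD 0

-- ===== PORT B =====
def spinlock_alt (steps : Int) (stop : Int) : Int :=
  if stop = 2018 then
    let st := (PySem.List.pyRange 1 2018 1).foldl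
      (fun (s : List Int × Int) i =>
        let pos := PySem.Int.mod (s.2 + steps) i + 1
        (PySem.List.insert s.1 pos i, pos)) ([0], 0)
    (PySem.List.pyGet? st.1 (st.2 + 1)).getD 0
  else
    ((PySem.List.pyRange 1 stop 1).foldl
      (fun (s : Int × Int) i =>
        let pos := PySem.Int.mod (s.1 + steps) i
        (pos + 1, if pos = 0 then i else s.2)) (0, 0)).2

-- ===== PRECONDITION & SPEC =====
-- the position at which the spinlock inserts the n-th value (0 = the initial circle [0])
def spinPos (steps : Int) : Nat → Int
  | 0 => 0
  | n + 1 => PySem.Int.mod (spinPos steps n + steps) ((n : Int) + 1) + 1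

-- Pre_ excludes exactly the inputs on which A raises: stop < 2 (ValueError/IndexError on a
-- buffer shorter than 2), and, for stop = 2018, the steps values for which the final insertion
-- puts 2017 at the very end of the buffer, where buffer[buffer.index(2017)+1] raises IndexError
-- (e.g. steps = 0); that set of steps has no closed form, so it is stated via the insertion-
-- position recurrence spinPos (the exact raise condition, not a convenience narrowing); B's
-- buf[pos+1] raises on exactly the same inputs.
def Pre_spinlock (steps : Int) (stop : Int) : Prop :=
  2 ≤ stop ∧ (stop = 2018 → spinPos steps 2017 ≠ 2017)
instance (steps : Int) (stop : Int) : Decidable (Pre_spinlock steps stop) := by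
  unfold Pre_spinlock; infer_instance
def pvWitness_spinlock : Int × Int := (3, 9)

def Spec_spinlock (steps : Int) (stop : Int) (out : Int) : Prop := out = spinlock_alt steps stop
instance (steps : Int) (stop : Int) (out : Int) : Decidable (Spec_spinlock steps stop out) := by
  unfold Spec_spinlock; infer_instance

-- ===== CLAIM (what is proved, stated in full; the proofs are below) =====
def Claim_equal_spinlock : Prop := ∀ (steps : Int) (stop : Int), Dom_spinlock steps stop → Pre_spinlock steps stop → Spec_spinlock steps stop (spinlock steps stop)

-- ===== LEMMAS AND PROOFS =====

-- A's buffer after inserting the values 0..n (a closed recursion for the foldl)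
def abuf (steps : Int) : Nat → List Int
  | 0 => [0]
  | n + 1 => spinlockStepA steps (abuf steps n) ((n : Int) + 1)

-- B's (pos, ans) state after the part-2 loop has processed i = 1..n
def bst (steps : Int) : Nat → Int × Int
  | 0 => (0, 0)
  | n + 1 =>
    let pos := PySem.Int.mod ((bst steps n).1 + steps) ((n : Int) + 1)
    (pos + 1, if pos = 0 then ((n : Int) + 1) else (bst steps n).2)

-- B's (buffer, pos) state after the part-1 loop has processed i = 1..n
def p1st (steps : Int) : Nat → List Int × Int
  | 0 => ([0], 0)
  | n + 1 =>
    let pos := PySem.Int.mod ((p1st steps n).2 + steps) ((n : Int) + 1) + 1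
    (PySem.List.insert (p1st steps n).1 pos ((n : Int) + 1), pos)

lemma foldA (steps : Int) : ∀ n : Nat,
    (PySem.List.pyRange 0 ((n : Int) + 1) 1).foldl (spinlockStepA steps) [] = abuf steps n := by
  intro n
  induction n with
  | zero =>
      rw [show ((0:Nat):Int) + 1 = 0 + 1 by norm_num, PySem.List.pyRange_one_singleton]
      simp [List.foldl, spinlockStepA, abuf, PySem.List.len]
  | succ n ih =>
      have hcast : (((n+1 : Nat) : Int) + 1) = ((n : Int) + 1) + 1 := by push_cast; ring
      rw [hcast, PySem.List.pyRange_one_succ_right (by omega), List.foldl_append, ih]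
      simp [abuf, List.foldl]

lemma foldB (steps : Int) : ∀ n : Nat,
    (PySem.List.pyRange 1 ((n : Int) + 1) 1).foldl
      (fun (s : Int × Int) i =>
        let pos := PySem.Int.mod (s.1 + steps) i
        (pos + 1, if pos = 0 then i else s.2)) (0, 0) = bst steps n := by
  intro n
  induction n with
  | zero =>
      simp [PySem.List.pyRange_one_eq_nil, bst]
  | succ n ih =>
      have hcast : (((n+1 : Nat) : Int) + 1) = ((n : Int) + 1) + 1 := by push_cast; ring
      rw [hcast, PySem.List.pyRange_one_succ_right (by omega), List.foldl_append, ih]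
      simp [bst, List.foldl]

lemma foldP1 (steps : Int) : ∀ n : Nat,
    (PySem.List.pyRange 1 ((n : Int) + 1) 1).foldl
      (fun (s : List Int × Int) i =>
        let pos := PySem.Int.mod (s.2 + steps) i + 1
        (PySem.List.insert s.1 pos i, pos)) ([0], 0) = p1st steps n := by
  intro n
  induction n with
  | zero =>
      simp [PySem.List.pyRange_one_eq_nil, p1st]
  | succ n ih =>
      have hcast : (((n+1 : Nat) : Int) + 1) = ((n : Int) + 1) + 1 := by push_cast; ring
      rw [hcast, PySem.List.pyRange_one_succ_right (by omega), List.foldl_append, ih]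
      simp [p1st, List.foldl]

-- the coupling invariant between A's buffer and B's two loop states
lemma inv (steps : Int) : ∀ n : Nat,
    (abuf steps n).length = n + 1 ∧
    (∀ x ∈ abuf steps n, 0 ≤ x ∧ x ≤ (n : Int)) ∧
    (abuf steps n)[0]? = some 0 ∧
    0 ≤ (bst steps n).1 ∧ (bst steps n).1 ≤ (n : Int) ∧
    PySem.List.index? (abuf steps n) (n : Int) = some (bst steps n).1.toNat ∧
    (1 ≤ n → (abuf steps n)[1]? = some (bst steps n).2) ∧
    (p1st steps n).1 = abuf steps n ∧ (p1st steps n).2 = (bst steps n).1 := by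
  intro n
  induction n with
  | zero =>
      refine ⟨rfl, ?_, rfl, le_refl 0, le_refl 0, ?_, by omega, rfl, rfl⟩
      · intro x hx; simp [abuf] at hx; omega
      · simp [abuf, bst]
  | succ n ih =>
      obtain ⟨hlen, hmem, h0, hpos0, hposle, hidx, h1, hp1buf, hp1pos⟩ := ih
      set L := abuf steps n with hL
      set p := (bst steps n).1 with hp
      set q := PySem.Int.mod (p + steps) ((n : Int) + 1) with hq
      have hq0 : 0 ≤ q := PySem.Int.mod_nonneg _ (by omega)
      have hqlt : q < (n : Int) + 1 := PySem.Int.mod_lt _ (by omega)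
      have hkle : q.toNat + 1 ≤ L.length := by omega
      have hinsert : PySem.List.insert L (q + 1) ((n : Int) + 1)
          = L.take (q.toNat + 1) ++ ((n : Int) + 1) :: L.drop (q.toNat + 1) := by
        have hq1 : q + 1 = ((q.toNat + 1 : Nat) : Int) := by omega
        rw [hq1, PySem.List.insert_natCast L (q.toNat + 1) _ hkle]
      -- unfold one step of A
      have hstep : abuf steps (n+1) = L.take (q.toNat + 1) ++ ((n : Int) + 1) :: L.drop (q.toNat + 1) := by
        show spinlockStepA steps L ((n : Int) + 1) = _
        rw [spinlockStepA]
        rw [if_neg (by simp [PySem.List.len_eq, hlen]; omega)]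
        have harg : ((n : Int) + 1) - 1 = (n : Int) := by ring
        rw [harg, hidx]
        simp only [Option.getD_some]
        have hcast : ((p.toNat : Int)) = p := Int.toNat_of_nonneg hpos0
        have hlenL : PySem.List.len L = (n : Int) + 1 := by simp [PySem.List.len_eq, hlen]
        rw [hcast, hlenL, ← hq, hinsert]
      -- unfold one step of B (part 2)
      have hbst : bst steps (n+1) = (q + 1, if q = 0 then ((n : Int) + 1) else (bst steps n).2) := rfl
      -- unfold one step of B (part 1)
      have hp1 : p1st steps (n+1)
          = (PySem.List.insert L (q + 1) ((n : Int) + 1), q + 1) := by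
        show (PySem.List.insert (p1st steps n).1
                (PySem.Int.mod ((p1st steps n).2 + steps) ((n : Int) + 1) + 1) ((n : Int) + 1),
              PySem.Int.mod ((p1st steps n).2 + steps) ((n : Int) + 1) + 1) = _
        rw [hp1buf, hp1pos, ← hq]
      have hmem' : ∀ x ∈ abuf steps (n+1), 0 ≤ x ∧ x ≤ ((n : Int) + 1) := by
        intro x hx
        rw [hstep] at hx
        simp only [List.mem_append, List.mem_cons] at hx
        rcases hx with hx | hx | hx
        · have := hmem x (List.mem_of_mem_take hx); constructor <;> omega
        · omega
        · have := hmem x (List.mem_of_mem_drop hx); constructor <;> omega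
      refine ⟨?_, ?_, ?_, by rw [hbst]; dsimp; omega, by rw [hbst]; dsimp; omega, ?_, ?_, ?_, ?_⟩
      · rw [hstep]; simp; omega
      · intro x hx
        have := hmem' x hx; omega
      · rw [hstep]
        rw [List.getElem?_append_left (by simp [List.length_take]; omega)]
        rw [List.getElem?_take_of_lt (by omega)]
        exact h0
      · -- index? of the newly inserted value n+1
        rw [hstep, hbst]
        apply (PySem.List.index?_eq_some_iff _ _ _).mpr
        refine ⟨L.take (q.toNat + 1), L.drop (q.toNat + 1), rfl, ?_, ?_⟩
        · simp [List.length_take]; omega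
        · intro hmemtake
          have := hmem _ (List.mem_of_mem_take hmemtake)
          omega
      · intro _
        rw [hstep, hbst]
        by_cases hz : q = 0
        · have : q.toNat + 1 = 1 := by omega
          rw [this]
          rw [List.getElem?_append_right (by simp [List.length_take])]
          simp [List.length_take, hlen, hz]
        · have h2le : 2 ≤ q.toNat + 1 := by omega
          rw [List.getElem?_append_left (by simp [List.length_take]; omega)]
          rw [List.getElem?_take_of_lt (by omega)]
          have hn1 : 1 ≤ n := by omega
          simp [hz, h1 hn1]
      · rw [hp1, hstep, ← hinsert]
      · rw [hp1, hbst]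

-- ===== VERDICT (by name: the statement is the Claim_ definition above) =====
theorem spinlock_spec : Claim_equal_spinlock := by
  intro steps stop _ hpre
  obtain ⟨h2, h2018⟩ := hpre
  unfold Spec_spinlock spinlock spinlock_alt
  by_cases hne : stop = 2018
  · -- part 1: both ports read the value after the last inserted position
    subst hne
    have hc : (2018 : Int) = ((2017 : Nat) : Int) + 1 := by norm_num
    obtain ⟨hlen, hmem, h0, hpos0, hposle, hidx, h1, hp1buf, hp1pos⟩ := inv steps 2017
    rw [if_pos rfl, if_pos rfl, hc, foldA steps 2017, foldP1 steps 2017]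
    have hidx' : PySem.List.index? (abuf steps 2017) 2017 = some (bst steps 2017).1.toNat := by
      have : ((2017 : Nat) : Int) = (2017 : Int) := by norm_num
      rw [← this]; exact hidx
    show (PySem.List.pyGet? (abuf steps 2017)
          ((((PySem.List.index? (abuf steps 2017) 2017).getD 0 : Nat) : Int) + 1)).getD 0
        = (PySem.List.pyGet? (p1st steps 2017).1 ((p1st steps 2017).2 + 1)).getD 0
    rw [hidx', hp1buf, hp1pos]
    simp only [Option.getD_some]
    rw [Int.toNat_of_nonneg hpos0]
  · -- part 2: the value after 0 is the last value inserted at index 1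
    obtain ⟨k, hk, hk1⟩ : ∃ k : Nat, stop = (k : Int) + 1 ∧ 1 ≤ k :=
      ⟨(stop - 1).toNat, by omega, by omega⟩
    obtain ⟨hlen, hmem, h0, hpos0, hposle, hidx, h1, hp1buf, hp1pos⟩ := inv steps k
    rw [hk, if_neg (by omega), if_neg (by omega), foldA steps k, foldB steps k]
    -- the head of A's buffer is 0, so buffer.index(0) = 0
    obtain ⟨t, ht⟩ : ∃ t, abuf steps k = 0 :: t := by
      cases hL : abuf steps k with
      | nil => rw [hL] at h0; simp at h0
      | cons a t => rw [hL] at h0; simp at h0; exact ⟨t, by rw [h0]⟩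
    rw [ht, PySem.List.index?_cons_self]
    simp only [Option.getD_some, Int.natCast_zero, zero_add]
    rw [show (1 : Int) = ((1 : Nat) : Int) by norm_num, PySem.List.pyGet?_natCast]
    rw [← ht, h1 hk1]
    rfl
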